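-- pv_equiv track=rewrite | github.com/akash-s-halalli/VendorAuditAI | backend/app/services/analysis.py | _validate_framework_control
-- ===== SOURCE A (Python) =====
-- from typing import Any
--
-- def _validate_framework_control(
--     control_id: str | None,
--     control_mapping: dict[str, dict[str, Any]],
--     framework_id: str,
-- ) -> str | None:
--     """Validate that a framework control exists and normalize the ID.
--
--     Args:
--         control_id: The control ID from LLM response
--         control_mapping: Mapping of valid control IDs
--         framework_id: The framework being analyzed
--
--     Returns:
--         Validated control ID or None if not valid
--     """
--     if not control_id:
--         return None
--
--     # Direct match
--     if control_id in control_mapping: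
--         return control_id
--
--     # Try case-insensitive match
--     control_upper = control_id.upper()
--     for valid_id in control_mapping:
--         if valid_id.upper() == control_upper:
--             return valid_id
--
--     # Try partial match (e.g., "CC6.1" might be written as "CC6.1.1")
--     for valid_id in control_mapping:
--         if control_id.startswith(valid_id) or valid_id.startswith(control_id):
--             return valid_id
--
--     # Return original if no match found (might be a valid control not in our data)
--     return control_id
-- ===== SOURCE B (Python) =====
-- def _validate_framework_control(control_id, control_mapping, framework_id):
--     """Single pass over control_mapping: record exact / first case-insensitive /
--     first partial hit, then pick by the original precedence."""
--     if not control_id: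
--         return None
--     exact = False
--     ci_hit = None
--     partial_hit = None
--     cu = control_id.upper()
--     for valid_id in control_mapping:
--         if valid_id == control_id:
--             exact = True
--         if ci_hit is None and valid_id.upper() == cu:
--             ci_hit = valid_id
--         if partial_hit is None and (control_id.startswith(valid_id) or valid_id.startswith(control_id)):
--             partial_hit = valid_id
--     if exact:
--         return control_id
--     if ci_hit is not None:
--         return ci_hit
--     if partial_hit is not None:
--         return partial_hit
--     return control_id
-- ===== Notes on version B (the rewrite author's own statement) =====
-- stated objective: alternative
-- what changed: Replaces A's three separate scans (membership test, case-insensitive loop, partial-match loop) with one fold over the mapping that simultaneously records the exact flag and the first case-insensitive and first partial candidates, selecting by precedence afterwards.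
import Mathlib
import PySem

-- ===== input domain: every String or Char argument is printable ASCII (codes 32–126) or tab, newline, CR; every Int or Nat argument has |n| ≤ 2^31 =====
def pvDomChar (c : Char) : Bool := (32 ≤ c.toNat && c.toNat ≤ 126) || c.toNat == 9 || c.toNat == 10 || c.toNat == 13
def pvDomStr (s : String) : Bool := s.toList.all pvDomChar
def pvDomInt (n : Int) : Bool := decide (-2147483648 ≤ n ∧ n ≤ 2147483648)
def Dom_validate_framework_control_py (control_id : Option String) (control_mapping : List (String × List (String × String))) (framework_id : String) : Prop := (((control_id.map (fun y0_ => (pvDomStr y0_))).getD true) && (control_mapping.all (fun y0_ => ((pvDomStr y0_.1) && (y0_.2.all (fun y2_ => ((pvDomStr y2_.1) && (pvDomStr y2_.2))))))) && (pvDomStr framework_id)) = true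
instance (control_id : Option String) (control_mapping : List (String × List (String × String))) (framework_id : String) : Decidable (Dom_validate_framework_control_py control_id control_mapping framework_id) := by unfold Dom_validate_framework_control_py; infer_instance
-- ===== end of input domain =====

-- ===== PORT A =====
-- B makes a single fold over the mapping collecting exact/case-insensitive/partial candidates instead of A's three separate scans (alternative decomposition, same cost).
def validate_framework_control_py (control_id : Option String) (control_mapping : List (String × List (String × String))) (framework_id : String) : Option String :=
  match control_id with
  | none => none
  | some cid =>
    if cid = "" then none
    else if control_mapping.any (fun kv => kv.1 == cid) then some cid
    else
      let cu := PySem.Str.upper cid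
      match control_mapping.find? (fun kv => PySem.Str.upper kv.1 == cu) with
      | some kv => some kv.1
      | none =>
        match control_mapping.find? (fun kv => PySem.Str.startswith cid kv.1 || PySem.Str.startswith kv.1 cid) with
        | some kv => some kv.1
        | none => some cid

-- ===== PORT B =====
def vfcStep (cid : String) (cu : String) (s : Bool × Option String × Option String) (kv : String × List (String × String)) : Bool × Option String × Option String :=
  ( s.1 || (kv.1 == cid),
    (match s.2.1 with
     | some x => some x
     | none => if PySem.Str.upper kv.1 == cu then some kv.1 else none),
    (match s.2.2 with
     | some x => some x
     | none => if PySem.Str.startswith cid kv.1 || PySem.Str.startswith kv.1 cid then some kv.1 else none) )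

def validate_framework_control_py_alt (control_id : Option String) (control_mapping : List (String × List (String × String))) (framework_id : String) : Option String :=
  match control_id with
  | none => none
  | some cid =>
    if cid = "" then none
    else
      let cu := PySem.Str.upper cid
      let st := control_mapping.foldl (vfcStep cid cu) (false, none, none)
      if st.1 then some cid
      else
        match st.2.1 with
        | some x => some x
        | none =>
          match st.2.2 with
          | some x => some x
          | none => some cid

-- ===== PRECONDITION & SPEC =====
def Spec_validate_framework_control_py (control_id : Option String) (control_mapping : List (String × List (String × String))) (framework_id : String) (out : Option String) : Prop := out = validate_framework_control_py_alt control_id control_mapping framework_id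
instance (control_id : Option String) (control_mapping : List (String × List (String × String))) (framework_id : String) (out : Option String) : Decidable (Spec_validate_framework_control_py control_id control_mapping framework_id out) := by unfold Spec_validate_framework_control_py; infer_instance

-- ===== CLAIM (what is proved, stated in full; the proofs are below) =====
def Claim_equal_validate_framework_control_py : Prop := ∀ (control_id : Option String) (control_mapping : List (String × List (String × String))) (framework_id : String), Dom_validate_framework_control_py control_id control_mapping framework_id → Spec_validate_framework_control_py control_id control_mapping framework_id (validate_framework_control_py control_id control_mapping framework_id)

-- ===== LEMMAS AND PROOFS =====

theorem vfc_fold (cid cu : String) (l : List (String × List (String × String)))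
    (e : Bool) (c p : Option String) :
    l.foldl (vfcStep cid cu) (e, c, p) =
      ( e || l.any (fun kv => kv.1 == cid),
        (match c with
         | some x => some x
         | none => (l.find? (fun kv => PySem.Str.upper kv.1 == cu)).map (·.1)),
        (match p with
         | some x => some x
         | none => (l.find? (fun kv => PySem.Str.startswith cid kv.1 || PySem.Str.startswith kv.1 cid)).map (·.1)) ) := by
  induction l generalizing e c p with
  | nil => cases c <;> cases p <;> simp
  | cons hd tl ih =>
    simp only [List.foldl_cons, vfcStep, ih, List.any_cons, List.find?_cons]
    cases hu : (PySem.Str.upper hd.1 == cu) <;>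
    cases hp : (PySem.Str.startswith cid hd.1 || PySem.Str.startswith hd.1 cid) <;>
    cases he : (hd.1 == cid) <;>
    cases c <;> cases p <;>
    simp only [hu, hp, he, Bool.false_or, Bool.true_or, Bool.or_assoc, Bool.or_false, Bool.or_true] <;> rfl

-- ===== VERDICT (by name: the statement is the Claim_ definition above) =====
theorem validate_framework_control_py_spec : Claim_equal_validate_framework_control_py := by
  intro control_id control_mapping framework_id _
  unfold Spec_validate_framework_control_py
  unfold validate_framework_control_py validate_framework_control_py_alt
  cases control_id with
  | none => rfl
  | some cid =>
    simp only [vfc_fold]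
    by_cases hcid : cid = ""
    · simp [hcid]
    · simp only [hcid, if_false, Bool.false_or]
      by_cases hex : control_mapping.any (fun kv => kv.1 == cid)
      · simp [hex]
      · simp only [hex]
        cases control_mapping.find? (fun kv => PySem.Str.upper kv.1 == PySem.Str.upper cid) with
        | some kv => simp
        | none =>
          cases control_mapping.find? (fun kv => PySem.Str.startswith cid kv.1 || PySem.Str.startswith kv.1 cid) <;> simp
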